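-- pv_equiv track=rewrite | github.com/cola0405/usaco | 1.py | crosswords
-- ===== SOURCE A (Python) =====
-- def horizontal(position, crossword, m):
--     if position[1] - 1 < 0 or crossword[position[0]][position[1] - 1] == "#":
--         if position[1] + 2 <= m - 1 and crossword[position[0]][position[1] + 1] == "." and crossword[position[0]][position[1] + 2] == ".":
--             return True
--     return False
--
-- def vertical(position, crossword, n):
--     if position[0] - 1 < 0 or crossword[position[0] - 1][position[1]] == "#":
--         if position[0] + 2 <= n - 1 and crossword[position[0] + 1][position[1]] == "." and crossword[position[0] + 2][position[1]] == '.':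
--             return True
--     return False
--
-- def crosswords(n, m, crossword):
--     res = 0
--     ans = []
--     for y in range(n):
--         for x in range(m):
--             if crossword[y][x] == ".":
--                 if vertical([y, x], crossword, n) or horizontal([y, x], crossword, m):
--                     res += 1
--                     ans.append([y + 1, x + 1])
--     return [res, ans]
-- ===== SOURCE B (Python) =====
-- def _line_starts(cell, length):
--     # run-detection scan: record the start of each '.' run of length >= 3
--     # whose preceding cell is the edge or '#'
--     starts = []
--     run, ok = 0, True
--     for t in range(length):
--         c = cell(t)
--         if c == ".":
--             run += 1
--             if run == 3 and ok:
--                 starts.append(t - 2)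
--         else:
--             run, ok = 0, c == "#"
--     return starts
--
--
-- def crosswords(n, m, crossword):
--     if n <= 0 or m <= 0:
--         return [0, []]
--     starts = set()
--     for y in range(n):
--         for s in _line_starts(lambda x: crossword[y][x], m):
--             starts.add((y, s))
--     for x in range(m):
--         for s in _line_starts(lambda y: crossword[y][x], n):
--             starts.add((s, x))
--     ans = [[y + 1, x + 1] for y in range(n) for x in range(m) if (y, x) in starts]
--     return [len(ans), ans]
-- ===== Notes on version B (the rewrite author's own statement) =====
-- stated objective: alternative
-- what changed: B detects runs of '.' cells with one linear scan per row and per column (tracking run length and whether the run follows an edge or '#'), collects the qualifying run-start cells in a set, and emits them in row-major order; A instead peeks at up to five neighbours of every single cell.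
import Mathlib
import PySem

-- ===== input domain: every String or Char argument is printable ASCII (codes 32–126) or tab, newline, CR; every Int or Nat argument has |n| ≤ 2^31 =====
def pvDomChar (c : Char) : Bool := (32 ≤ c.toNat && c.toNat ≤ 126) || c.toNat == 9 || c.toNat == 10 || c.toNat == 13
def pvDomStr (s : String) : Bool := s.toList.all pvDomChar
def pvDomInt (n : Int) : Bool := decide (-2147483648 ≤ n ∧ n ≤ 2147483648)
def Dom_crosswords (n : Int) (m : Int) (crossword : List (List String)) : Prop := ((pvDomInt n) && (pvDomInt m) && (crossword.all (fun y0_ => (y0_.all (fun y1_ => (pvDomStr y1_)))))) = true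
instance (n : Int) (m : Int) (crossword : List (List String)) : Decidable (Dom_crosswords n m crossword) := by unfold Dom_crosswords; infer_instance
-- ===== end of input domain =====

-- B replaces A's five-neighbour peek at every cell by a run-detection scan per row and
-- per column collecting clue-start cells into a set, emitted in row-major order (objective: alternative decomposition, same cost).

-- ===== PORT A =====
-- crossword[y][x]; total form (the default is never reached inside Pre_)
def pyCell (cw : List (List String)) (y x : Int) : String :=
  (PySem.List.pyGet? ((PySem.List.pyGet? cw y).getD []) x).getD ""

def horizontal (position : Int × Int) (crossword : List (List String)) (m : Int) : Bool :=
  if position.2 - 1 < 0 ∨ pyCell crossword position.1 (position.2 - 1) = "#" then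
    if position.2 + 2 ≤ m - 1 ∧ pyCell crossword position.1 (position.2 + 1) = "." ∧ pyCell crossword position.1 (position.2 + 2) = "." then
      true
    else false
  else false

def vertical (position : Int × Int) (crossword : List (List String)) (n : Int) : Bool :=
  if position.1 - 1 < 0 ∨ pyCell crossword (position.1 - 1) position.2 = "#" then
    if position.1 + 2 ≤ n - 1 ∧ pyCell crossword (position.1 + 1) position.2 = "." ∧ pyCell crossword (position.1 + 2) position.2 = "." then
      true
    else false
  else false

def crosswords (n : Int) (m : Int) (crossword : List (List String)) : Int × List (List Int) :=
  let st := (PySem.List.pyRange 0 n 1).foldl (fun st y =>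
    (PySem.List.pyRange 0 m 1).foldl (fun st x =>
      if pyCell crossword y x = "." then
        if vertical (y, x) crossword n = true ∨ horizontal (y, x) crossword m = true then
          (st.1 + 1, st.2 ++ [[y + 1, x + 1]])
        else st
      else st) st) ((0 : Int), ([] : List (List Int)))
  st

-- ===== PORT B =====
-- run-detection scan of one line (Source B's _line_starts over range(length))
def lineStarts (cell : Int → String) : List Int → Int → Bool → List Int
  | [], _, _ => []
  | t :: ts, run, ok =>
    if cell t = "." then
      if run + 1 = 3 ∧ ok = true then (t - 2) :: lineStarts cell ts (run + 1) ok
      else lineStarts cell ts (run + 1) ok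
    else lineStarts cell ts 0 (decide (cell t = "#"))

def crosswords_alt (n : Int) (m : Int) (crossword : List (List String)) : Int × List (List Int) :=
  if n ≤ 0 ∨ m ≤ 0 then ((0 : Int), ([] : List (List Int))) else
  let s1 : PySem.Set (Int × Int) := (PySem.List.pyRange 0 n 1).foldl (fun st y =>
    (lineStarts (fun x => pyCell crossword y x) (PySem.List.pyRange 0 m 1) 0 true).foldl
      (fun st s => PySem.Set.add st (y, s)) st) PySem.Set.empty
  let starts : PySem.Set (Int × Int) := (PySem.List.pyRange 0 m 1).foldl (fun st x =>
    (lineStarts (fun y => pyCell crossword y x) (PySem.List.pyRange 0 n 1) 0 true).foldl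
      (fun st s => PySem.Set.add st (s, x)) st) s1
  let ans := (PySem.List.pyRange 0 n 1).flatMap (fun y =>
    ((PySem.List.pyRange 0 m 1).filter (fun x => PySem.Set.contains starts (y, x))).map
      (fun x => [y + 1, x + 1]))
  ((ans.length : Int), ans)

-- ===== PRECONDITION & SPEC =====
-- exactly the inputs on which Python A returns (no IndexError): when both loops are
-- nonempty, the grid must have at least n rows whose first n rows each have at least m cells
def Pre_crosswords (n : Int) (m : Int) (crossword : List (List String)) : Prop :=
  (0 < n ∧ 0 < m) → (n ≤ (crossword.length : Int) ∧ ∀ row ∈ crossword.take n.toNat, m ≤ (row.length : Int))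
instance (n : Int) (m : Int) (crossword : List (List String)) : Decidable (Pre_crosswords n m crossword) := by unfold Pre_crosswords; infer_instance

def pvWitness_crosswords : Int × Int × List (List String) :=
  (3, 3, [[".", ".", "."], [".", "#", "."], [".", "#", "."]])

def Spec_crosswords (n : Int) (m : Int) (crossword : List (List String)) (out : Int × List (List Int)) : Prop := out = crosswords_alt n m crossword
instance (n : Int) (m : Int) (crossword : List (List String)) (out : Int × List (List Int)) : Decidable (Spec_crosswords n m crossword out) := by unfold Spec_crosswords; infer_instance

-- ===== CLAIM (what is proved, stated in full; the proofs are below) =====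
def Claim_equal_crosswords : Prop := ∀ (n : Int) (m : Int) (crossword : List (List String)), Dom_crosswords n m crossword → Pre_crosswords n m crossword → Spec_crosswords n m crossword (crosswords n m crossword)

-- ===== LEMMAS AND PROOFS =====

-- absolute characterisation of a clue start on one line of length L
def isStart (cell : Int → String) (L s : Int) : Prop :=
  0 ≤ s ∧ s + 2 < L ∧ cell s = "." ∧ cell (s + 1) = "." ∧ cell (s + 2) = "." ∧
    (s = 0 ∨ cell (s - 1) = "#")

-- loop invariant of the scan: run = exact number of trailing dots before index i,
-- ok = that run is preceded by the edge or '#'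
def ScanInv (cell : Int → String) (i run : Int) (ok : Bool) : Prop :=
  0 ≤ run ∧ run ≤ i ∧ (∀ j, i - run ≤ j → j < i → cell j = ".") ∧
    (run < i → cell (i - run - 1) ≠ ".") ∧ (ok = true ↔ (run = i ∨ cell (i - run - 1) = "#"))

theorem record_iff_isStart (cell : Int → String) {L i run : Int} {ok : Bool}
    (_hi : 0 ≤ i) (hiL : i < L) (hdot : cell i = ".") (hinv : ScanInv cell i run ok) :
    (run = 2 ∧ ok = true) ↔ isStart cell L (i - 2) := by
  obtain ⟨h0, hle, hreg, hbd, hok⟩ := hinv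
  constructor
  · rintro ⟨hrun, hoktrue⟩
    subst hrun
    have hi2 : 2 ≤ i := hle
    refine ⟨by omega, by omega, ?_, ?_, ?_, ?_⟩
    · have := hreg (i - 2) (by omega) (by omega); simpa using this
    · have := hreg (i - 1) (by omega) (by omega)
      simpa [show i - 2 + 1 = i - 1 by omega] using this
    · simpa [show i - 2 + 2 = i by omega] using hdot
    · rcases hok.mp hoktrue with h | h
      · left; omega
      · right; simpa [show i - 2 - 1 = i - 2 - 1 by omega] using h
  · rintro ⟨hs0, _, c2, c1, c0, hp⟩
    have e1 : i - 2 + 1 = i - 1 := by omega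
    have e2 : i - 2 + 2 = i := by omega
    rw [e1] at c1
    have hi2 : 2 ≤ i := by omega
    have hrun2 : run = 2 := by
      by_contra hne
      rcases lt_or_gt_of_ne hne with hlt | hgt
      · -- run ≤ 1, so the boundary cell i - run - 1 ∈ {i-1, i-2} is a dot: contradiction
        have hb : run < i := by omega
        have := hbd hb
        interval_cases run
        · exact this (by simpa [show i - 0 - 1 = i - 1 by omega] using c1)
        · exact this (by simpa [show i - 1 - 1 = i - 2 by omega] using c2)
      · -- run ≥ 3, so cell (i-3) is a dot, but hp says edge or '#'
        have hdot3 : cell (i - 3) = "." := hreg (i - 3) (by omega) (by omega)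
        rcases hp with h | h
        · omega
        · rw [show i - 2 - 1 = i - 3 by omega] at h
          simp [h] at hdot3
    subst hrun2
    refine ⟨rfl, hok.mpr ?_⟩
    rcases hp with h | h
    · left; omega
    · right; rwa [show i - 2 - 1 = i - 2 - 1 from rfl] at h
      
theorem lineStarts_mem_aux (cell : Int → String) (L : Int) :
    ∀ (k : Nat) (i run : Int) (ok : Bool), (L - i).toNat = k → 0 ≤ i → ScanInv cell i run ok →
    ∀ s, s ∈ lineStarts cell (PySem.List.pyRange i L 1) run ok ↔ (isStart cell L s ∧ i ≤ s + 2) := by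
  intro k
  induction k with
  | zero =>
    intro i run ok hk hi hinv s
    have hLi : L ≤ i := by omega
    rw [PySem.List.pyRange_one_eq_nil hLi]
    simp only [lineStarts, List.not_mem_nil, false_iff]
    rintro ⟨⟨_, h2, _⟩, hle⟩
    omega
  | succ k ih =>
    intro i run ok hk hi hinv s
    have hiL : i < L := by omega
    rw [PySem.List.pyRange_one_cons hiL]
    obtain ⟨h0, hle, hreg, hbd, hok⟩ := hinv
    by_cases hdot : cell i = "."
    · have hinv' : ScanInv cell (i + 1) (run + 1) ok := by
        refine ⟨by omega, by omega, ?_, ?_, ?_⟩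
        · intro j hj1 hj2
          rcases lt_or_ge j i with h | h
          · exact hreg j (by omega) h
          · have : j = i := by omega
            simpa [this] using hdot
        · intro h
          have := hbd (by omega)
          simpa [show i + 1 - (run + 1) - 1 = i - run - 1 by omega] using this
        · rw [show i + 1 - (run + 1) - 1 = i - run - 1 by omega]
          constructor
          · intro h; rcases hok.mp h with h' | h'
            · left; omega
            · right; exact h'
          · intro h; apply hok.mpr; rcases h with h' | h'
            · left; omega
            · right; exact h'
      have ihrec := ih (i + 1) (run + 1) ok (by omega) (by omega) hinv' s
      have hrec := record_iff_isStart cell (by omega) hiL hdot ⟨h0, hle, hreg, hbd, hok⟩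
      simp only [lineStarts]
      rw [if_pos hdot]
      by_cases hc : run + 1 = 3 ∧ ok = true
      · have hc2 : run = 2 ∧ ok = true := ⟨by omega, hc.2⟩
        rw [if_pos hc]
        simp only [List.mem_cons, ihrec]
        constructor
        · rintro (h | ⟨hs, hle'⟩)
          · subst h; exact ⟨hrec.mp hc2, by omega⟩
          · exact ⟨hs, by omega⟩
        · rintro ⟨hs, hle'⟩
          rcases eq_or_lt_of_le hle' with heq | hlt
          · left; omega
          · right; exact ⟨hs, by omega⟩
      · have hc2 : ¬ (run = 2 ∧ ok = true) := by
          intro h; exact hc ⟨by omega, h.2⟩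
        rw [if_neg hc]
        rw [ihrec]
        constructor
        · rintro ⟨hs, hle'⟩; exact ⟨hs, by omega⟩
        · rintro ⟨hs, hle'⟩
          refine ⟨hs, ?_⟩
          rcases eq_or_lt_of_le hle' with heq | hlt
          · exfalso
            have : s = i - 2 := by omega
            subst this
            exact hc2 (hrec.mpr hs)
          · omega
    · have hinv' : ScanInv cell (i + 1) 0 (decide (cell i = "#")) := by
        refine ⟨le_refl _, by omega, ?_, ?_, ?_⟩
        · intro j hj1 hj2; omega
        · intro _
          simpa [show i + 1 - 0 - 1 = i by omega] using hdot
        · rw [show i + 1 - 0 - 1 = i by omega]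
          simp only [decide_eq_true_eq]
          constructor
          · intro h; right; exact h
          · intro h
            rcases h with h | h
            · omega
            · exact h
      have ihrec := ih (i + 1) 0 (decide (cell i = "#")) (by omega) (by omega) hinv' s
      simp only [lineStarts]
      rw [if_neg hdot]
      rw [ihrec]
      constructor
      · rintro ⟨hs, hle'⟩; exact ⟨hs, by omega⟩
      · rintro ⟨hs, hle'⟩
        refine ⟨hs, ?_⟩
        rcases eq_or_lt_of_le hle' with heq | hlt
        · exfalso
          obtain ⟨_, _, _, _, c0, _⟩ := hs
          rw [show s + 2 = i by omega] at c0
          exact hdot c0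
        · omega

theorem lineStarts_mem (cell : Int → String) (L : Int) (s : Int) :
    s ∈ lineStarts cell (PySem.List.pyRange 0 L 1) 0 true ↔ isStart cell L s := by
  have h := lineStarts_mem_aux cell L (L - 0).toNat 0 0 true rfl (le_refl _)
    ⟨le_refl _, le_refl _, by intro j h1 h2; omega, by intro h; omega, by simp⟩ s
  rw [h]
  constructor
  · exact fun h => h.1
  · intro hs; exact ⟨hs, by have := hs.1; omega⟩

-- membership in a doubly-nested fold of Set.add
theorem mem_double_fold (p : Int × Int) (l : List Int) (f : Int → List Int)
    (g : Int → Int → Int × Int) (s0 : PySem.Set (Int × Int)) :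
    p ∈ l.foldl (fun st a => (f a).foldl (fun st b => PySem.Set.add st (g a b)) st) s0 ↔
      p ∈ s0 ∨ ∃ a ∈ l, ∃ b ∈ f a, p = g a b := by
  induction l generalizing s0 with
  | nil => simp
  | cons a l ih =>
    rw [List.foldl_cons, ih]
    rw [PySem.Set.mem_foldl_add]
    simp only [List.mem_cons]
    constructor
    · rintro ((h | ⟨b, hb, hp⟩) | ⟨a', ha', b, hb, hp⟩)
      · exact Or.inl h
      · exact Or.inr ⟨a, Or.inl rfl, b, hb, hp⟩
      · exact Or.inr ⟨a', Or.inr ha', b, hb, hp⟩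
    · rintro (h | ⟨a', (rfl | ha'), b, hb, hp⟩)
      · exact Or.inl (Or.inl h)
      · exact Or.inl (Or.inr ⟨b, hb, hp⟩)
      · exact Or.inr ⟨a', ha', b, hb, hp⟩

-- A's per-cell test is exactly "start of a horizontal run or of a vertical run"
theorem cellCond (cw : List (List String)) (n m y x : Int)
    (hy : 0 ≤ y) (_hyn : y < n) (hx : 0 ≤ x) (_hxm : x < m) :
    (pyCell cw y x = "." ∧ (vertical (y, x) cw n = true ∨ horizontal (y, x) cw m = true)) ↔
      (isStart (fun t => pyCell cw y t) m x ∨ isStart (fun t => pyCell cw t x) n y) := by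
  unfold vertical horizontal isStart
  simp only
  constructor
  · rintro ⟨hc, h | h⟩
    · right
      split_ifs at h with h1 h2
      · exact ⟨hy, by omega, hc, h2.2.1, h2.2.2, h1.imp (fun _ => by omega) (fun h => h)⟩
    · left
      split_ifs at h with h1 h2
      · exact ⟨hx, by omega, hc, h2.2.1, h2.2.2, h1.imp (fun _ => by omega) (fun h => h)⟩
  · rintro (⟨_, h2, c0, c1, c2, hp⟩ | ⟨_, h2, c0, c1, c2, hp⟩)
    · refine ⟨c0, Or.inr ?_⟩
      rw [if_pos (hp.imp (fun _ => by omega) (fun h => h))]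
      rw [if_pos ⟨by omega, c1, c2⟩]
    · refine ⟨c0, Or.inl ?_⟩
      rw [if_pos (hp.imp (fun _ => by omega) (fun h => h))]
      rw [if_pos ⟨by omega, c1, c2⟩]

-- the append-and-count loop body of A, in closed form
theorem foldl_count_append (l : List Int) (P : Int → Prop) [DecidablePred P]
    (f : Int → List Int) (st : Int × List (List Int)) :
    l.foldl (fun st x => if P x then (st.1 + 1, st.2 ++ [f x]) else st) st
      = (st.1 + ((l.filter (fun x => decide (P x))).length : Int),
         st.2 ++ (l.filter (fun x => decide (P x))).map f) := by
  induction l generalizing st with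
  | nil => simp
  | cons a l ih =>
    rw [List.foldl_cons, ih]
    by_cases h : P a
    · simp [h]; omega
    · simp [h]

theorem foldl_pair_acc (ys : List Int) (g : Int → Int) (h : Int → List (List Int)) :
    ∀ (a : Int) (b : List (List Int)),
    ys.foldl (fun st y => (st.1 + g y, st.2 ++ h y)) (a, b)
      = (a + (ys.map g).sum, b ++ ys.flatMap h) := by
  induction ys with
  | nil => intro a b; simp
  | cons c ys ih =>
    intro a b
    rw [List.foldl_cons]
    simp only
    rw [ih]
    simp
    omega

-- ===== VERDICT (by name: the statement is the Claim_ definition above) =====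
theorem crosswords_spec : Claim_equal_crosswords := by
  intro n m cw _ _
  unfold Spec_crosswords crosswords crosswords_alt
  simp only
  by_cases hdeg : n ≤ 0 ∨ m ≤ 0
  · rw [if_pos hdeg]
    rcases hdeg with h | h
    · rw [PySem.List.pyRange_one_eq_nil (show n ≤ (0 : Int) from h)]
      simp
    · rw [PySem.List.pyRange_one_eq_nil (show m ≤ (0 : Int) from h)]
      simp only [List.foldl_nil]
      rw [PySem.List.foldl_ignore]
  rw [if_neg hdeg]
  set starts : PySem.Set (Int × Int) := (PySem.List.pyRange 0 m 1).foldl (fun st x =>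
    (lineStarts (fun y => pyCell cw y x) (PySem.List.pyRange 0 n 1) 0 true).foldl
      (fun st s => PySem.Set.add st (s, x)) st)
    ((PySem.List.pyRange 0 n 1).foldl (fun st y =>
      (lineStarts (fun x => pyCell cw y x) (PySem.List.pyRange 0 m 1) 0 true).foldl
        (fun st s => PySem.Set.add st (y, s)) st) PySem.Set.empty) with hstarts
  -- membership in the starts set, for a cell inside the grid
  have hmem : ∀ y x, 0 ≤ y → y < n → 0 ≤ x → x < m →
      ((y, x) ∈ starts ↔
        (isStart (fun t => pyCell cw y t) m x ∨ isStart (fun t => pyCell cw t x) n y)) := by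
    intro y x hy hyn hx hxm
    rw [hstarts]
    rw [mem_double_fold ((y, x)) _ _ (fun a b => (b, a)) _]
    rw [mem_double_fold ((y, x)) _ _ (fun a b => (a, b)) _]
    have hempty : (y, x) ∉ (PySem.Set.empty : PySem.Set (Int × Int)) := by
      simp [PySem.Set.empty]
    constructor
    · rintro ((h | ⟨a, ha, b, hb, hp⟩) | ⟨a, ha, b, hb, hp⟩)
      · exact absurd h hempty
      · have h' : y = a ∧ x = b := by simpa using hp
        rw [← h'.1, ← h'.2] at hb
        exact Or.inl ((lineStarts_mem _ m x).mp hb)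
      · have h' : y = b ∧ x = a := by simpa using hp
        rw [← h'.1, ← h'.2] at hb
        exact Or.inr ((lineStarts_mem _ n y).mp hb)
    · rintro (h | h)
      · exact Or.inl (Or.inr ⟨y, by rw [PySem.List.mem_pyRange_one]; exact ⟨hy, hyn⟩,
          x, (lineStarts_mem _ m x).mpr h, rfl⟩)
      · exact Or.inr ⟨x, by rw [PySem.List.mem_pyRange_one]; exact ⟨hx, hxm⟩,
          y, (lineStarts_mem _ n y).mpr h, rfl⟩
  -- the two per-cell boolean tests agree inside the grid
  have hfiltereq : ∀ y, y ∈ PySem.List.pyRange 0 n 1 →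
      (PySem.List.pyRange 0 m 1).filter
          (fun x => decide (pyCell cw y x = "." ∧ (vertical (y, x) cw n = true ∨ horizontal (y, x) cw m = true)))
        = (PySem.List.pyRange 0 m 1).filter (fun x => PySem.Set.contains starts (y, x)) := by
    intro y hy
    rw [PySem.List.mem_pyRange_one] at hy
    apply List.filter_congr
    intro x hx
    rw [PySem.List.mem_pyRange_one] at hx
    have h1 := cellCond cw n m y x hy.1 hy.2 hx.1 hx.2
    have h2 := hmem y x hy.1 hy.2 hx.1 hx.2
    rw [show (PySem.Set.contains starts (y, x)) = decide ((y, x) ∈ starts) by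
      simp [PySem.Set.contains_eq_listContains]]
    simp only [decide_eq_decide]
    rw [h1, h2]
  -- rewrite A's nested loop into closed form
  have hA : ∀ (st : Int × List (List Int)) y,
      (PySem.List.pyRange 0 m 1).foldl (fun st x =>
        if pyCell cw y x = "." then
          if vertical (y, x) cw n = true ∨ horizontal (y, x) cw m = true then
            (st.1 + 1, st.2 ++ [[y + 1, x + 1]])
          else st
        else st) st
      = (st.1 + (((PySem.List.pyRange 0 m 1).filter
            (fun x => decide (pyCell cw y x = "." ∧ (vertical (y, x) cw n = true ∨ horizontal (y, x) cw m = true)))).length : Int),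
         st.2 ++ ((PySem.List.pyRange 0 m 1).filter
            (fun x => decide (pyCell cw y x = "." ∧ (vertical (y, x) cw n = true ∨ horizontal (y, x) cw m = true)))).map
              (fun x => [y + 1, x + 1])) := by
    intro st y
    rw [← foldl_count_append (PySem.List.pyRange 0 m 1)
      (fun x => pyCell cw y x = "." ∧ (vertical (y, x) cw n = true ∨ horizontal (y, x) cw m = true))
      (fun x => [y + 1, x + 1]) st]
    apply PySem.List.foldl_congr_mem
    intro acc x _
    by_cases h1 : pyCell cw y x = "."
    · by_cases h2 : vertical (y, x) cw n = true ∨ horizontal (y, x) cw m = true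
      · simp [h1, h2]
      · simp [h1, h2]
    · simp [h1]
  have houter : (PySem.List.pyRange 0 n 1).foldl (fun st y =>
      (PySem.List.pyRange 0 m 1).foldl (fun st x =>
        if pyCell cw y x = "." then
          if vertical (y, x) cw n = true ∨ horizontal (y, x) cw m = true then
            (st.1 + 1, st.2 ++ [[y + 1, x + 1]])
          else st
        else st) st) ((0 : Int), ([] : List (List Int)))
    = ((0 : Int) + (((PySem.List.pyRange 0 n 1).map (fun y => (((PySem.List.pyRange 0 m 1).filter
          (fun x => decide (pyCell cw y x = "." ∧ (vertical (y, x) cw n = true ∨ horizontal (y, x) cw m = true)))).length : Int))).sum),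
       ([] : List (List Int)) ++ (PySem.List.pyRange 0 n 1).flatMap (fun y =>
        ((PySem.List.pyRange 0 m 1).filter
          (fun x => decide (pyCell cw y x = "." ∧ (vertical (y, x) cw n = true ∨ horizontal (y, x) cw m = true)))).map
            (fun x => [y + 1, x + 1]))) := by
    rw [← foldl_pair_acc]
    apply PySem.List.foldl_congr_mem
    intro acc y _
    rw [hA]
  rw [houter]
  -- replace A's filter by B's membership filter
  have hflat : (PySem.List.pyRange 0 n 1).flatMap (fun y =>
      ((PySem.List.pyRange 0 m 1).filter
        (fun x => decide (pyCell cw y x = "." ∧ (vertical (y, x) cw n = true ∨ horizontal (y, x) cw m = true)))).map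
          (fun x => [y + 1, x + 1]))
    = (PySem.List.pyRange 0 n 1).flatMap (fun y =>
      ((PySem.List.pyRange 0 m 1).filter (fun x => PySem.Set.contains starts (y, x))).map
        (fun x => [y + 1, x + 1])) := by
    unfold List.flatMap
    congr 1
    apply List.map_congr_left
    intro y hy
    rw [hfiltereq y hy]
  have hsum : ((PySem.List.pyRange 0 n 1).map (fun y => (((PySem.List.pyRange 0 m 1).filter
        (fun x => decide (pyCell cw y x = "." ∧ (vertical (y, x) cw n = true ∨ horizontal (y, x) cw m = true)))).length : Int))).sum
      = (((PySem.List.pyRange 0 n 1).flatMap (fun y =>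
        ((PySem.List.pyRange 0 m 1).filter (fun x => PySem.Set.contains starts (y, x))).map
          (fun x => [y + 1, x + 1]))).length : Int) := by
    rw [List.length_flatMap]
    rw [Nat.cast_list_sum, List.map_map]
    congr 1
    apply List.map_congr_left
    intro y hy
    simp only [Function.comp]
    rw [← hfiltereq y hy]
    simp
  rw [hflat, hsum]
  simp
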